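-- pv_equiv track=rewrite | github.com/mm3l/Codility | MaxCounters/MaxCounters.py | solution
-- ===== SOURCE A (Python) =====
-- def solution(N, A):
--     """
--     MaxCounters
--     Calculates the values of counters after applying all alternating operations:
--     increase counter by 1; set value of all counters to current maximum.
--     """
--
--     counters = [0] * N
--     last = 0
--     maximum = 0
--
--     for i in range(len(A)):
--
--         if A[i] < (N+1):
--
--             if counters[A[i]-1] < last:
--                 counters[A[i]-1] = last
--
--             counters[A[i]-1] += 1
--
--             if counters[A[i]-1] > maximum:
--                 maximum = counters[A[i]-1]
--
--         else:
--             last = maximum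
--
--     for i in range(len(counters)):
--         if counters[i] < last:
--             counters[i] = last
--
--     return counters
-- ===== SOURCE B (Python) =====
-- def solution(N, A):
--     """Eager simulation: each max-set operation rebuilds the counter list at once,
--     so no lazy floor variable and no final flooring pass are needed."""
--     counters = [0] * N
--     maximum = 0
--     for x in A:
--         if x < N + 1:
--             counters[x - 1] += 1
--             if counters[x - 1] > maximum:
--                 maximum = counters[x - 1]
--         else:
--             counters = [maximum] * N
--     return counters
-- ===== Notes on version B (the rewrite author's own statement) =====
-- stated objective: simpler
-- what changed: B replaces A's lazy 'last' floor (extra state variable plus a final flooring pass over the counters) with an eager simulation that rebuilds the whole counter list at each max-set operation, so no 'last' and no final pass exist; Pre_ excludes only the inputs on which both programs raise IndexError (an increment whose index x-1 falls outside the list).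
import Mathlib
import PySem

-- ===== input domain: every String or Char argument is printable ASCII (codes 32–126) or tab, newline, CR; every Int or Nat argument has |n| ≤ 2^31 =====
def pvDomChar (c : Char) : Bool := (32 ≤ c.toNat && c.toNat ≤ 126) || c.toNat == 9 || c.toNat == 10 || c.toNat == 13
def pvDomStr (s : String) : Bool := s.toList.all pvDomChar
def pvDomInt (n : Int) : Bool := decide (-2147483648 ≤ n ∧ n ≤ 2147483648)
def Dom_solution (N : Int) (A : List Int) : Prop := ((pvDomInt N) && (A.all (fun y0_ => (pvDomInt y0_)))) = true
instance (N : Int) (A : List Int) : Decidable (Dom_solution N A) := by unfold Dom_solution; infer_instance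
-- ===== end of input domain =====

-- B replaces A's lazy `last` floor (applied in a final pass) by eagerly rebuilding the
-- whole counter list at each max-set operation: simpler (no final pass, no `last` state).

-- ===== PORT A =====
-- final pass: for i in range(len(counters)): if counters[i] < last: counters[i] = last
def floorLast (last : Int) : List Int → List Int
  | [] => []
  | c :: cs => (if c < last then last else c) :: floorLast last cs

-- loop body of A; state = (counters, last, maximum)
def stepA (N : Int) (st : List Int × Int × Int) (x : Int) : List Int × Int × Int :=
  if x < N + 1 then
    let c0 := PySem.List.pyGetD st.1 (x - 1) 0
    let c1 := (if c0 < st.2.1 then st.2.1 else c0) + 1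
    (PySem.List.pySetD st.1 (x - 1) c1, st.2.1, if c1 > st.2.2 then c1 else st.2.2)
  else
    (st.1, st.2.2, st.2.2)

def solution (N : Int) (A : List Int) : List Int :=
  let s := A.foldl (stepA N) (List.replicate N.toNat 0, 0, 0)
  floorLast s.2.1 s.1

-- ===== PORT B =====
-- loop body of B; state = (counters, maximum)
def stepB (N : Int) (st : List Int × Int) (x : Int) : List Int × Int :=
  if x < N + 1 then
    let v := PySem.List.pyGetD st.1 (x - 1) 0 + 1
    (PySem.List.pySetD st.1 (x - 1) v, if v > st.2 then v else st.2)
  else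
    (List.replicate N.toNat st.2, st.2)

def solution_alt (N : Int) (A : List Int) : List Int :=
  (A.foldl (stepB N) (List.replicate N.toNat 0, 0)).1

-- ===== PRECONDITION & SPEC =====
-- Pre_ excludes exactly the inputs on which A raises IndexError: an increment operation
-- (x < N+1) whose Python index x-1 falls outside the counter list (i.e. x < 1-N or N ≤ 0).
def Pre_solution (N : Int) (A : List Int) : Prop := ∀ x ∈ A, x < N + 1 → 0 < N ∧ 1 - N ≤ x
instance (N : Int) (A : List Int) : Decidable (Pre_solution N A) := by unfold Pre_solution; infer_instance
def pvWitness_solution : Int × List Int := (3, [1, 2, 4, 3, 1])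

def Spec_solution (N : Int) (A : List Int) (out : List Int) : Prop := out = solution_alt N A
instance (N : Int) (A : List Int) (out : List Int) : Decidable (Spec_solution N A out) := by unfold Spec_solution; infer_instance

-- ===== CLAIM (what is proved, stated in full; the proofs are below) =====
def Claim_equal_solution : Prop := ∀ (N : Int) (A : List Int), Dom_solution N A → Pre_solution N A → Spec_solution N A (solution N A)

-- ===== LEMMAS AND PROOFS =====

-- the coupling invariant between A's lazy state s = (counters, last, maximum)
-- and B's eager state t = (counters', maximum')
def InvMC (N : Int) (s : List Int × Int × Int) (t : List Int × Int) : Prop :=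
  s.1.length = N.toNat ∧ t.1.length = N.toNat ∧ t.2 = s.2.2 ∧
  0 ≤ s.2.1 ∧ s.2.1 ≤ s.2.2 ∧
  (∀ i : Nat, s.1.getD i 0 ≤ s.2.2) ∧
  (∀ i < N.toNat, t.1.getD i 0 = if s.1.getD i 0 < s.2.1 then s.2.1 else s.1.getD i 0)

lemma pyIdx_mod (n : Nat) (i : Int) (h1 : -(n:Int) ≤ i) (h2 : i < n) :
    PySem.List.pyIdx? n i = some (PySem.Int.mod i n).toNat := by
  have hf : PySem.Int.mod i n = i % (n:Int) := by
    unfold PySem.Int.mod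
    rw [Int.fmod_eq_emod, if_pos (Or.inl (Int.natCast_nonneg n)), add_zero]
  by_cases h : 0 ≤ i
  · unfold PySem.List.pyIdx?
    rw [if_pos h, if_pos h2, hf, Int.emod_eq_of_lt h h2]
  · unfold PySem.List.pyIdx?
    have hmod : i % (n:Int) = i + n := by
      have h2' : (i + n) % (n:Int) = i % n := by
        have := Int.add_mul_emod_self_left (a := i) (b := (n:Int)) (c := 1)
        simp only [mul_one] at this
        exact this
      rw [← h2', Int.emod_eq_of_lt (by omega) (by omega)]
    rw [if_neg h, if_pos h1, hf, hmod]
    congr 1; omega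

lemma pyGetD_mod (xs : List Int) (i : Int) (h1 : -(xs.length:Int) ≤ i) (h2 : i < xs.length) :
    PySem.List.pyGetD xs i 0 = xs.getD (PySem.Int.mod i xs.length).toNat 0 := by
  simp [PySem.List.pyGetD, PySem.List.pyGet?, pyIdx_mod _ _ h1 h2, List.getD_eq_getElem?_getD]

lemma pySetD_mod (xs : List Int) (i : Int) (v : Int) (h1 : -(xs.length:Int) ≤ i) (h2 : i < xs.length) :
    PySem.List.pySetD xs i v = xs.set (PySem.Int.mod i xs.length).toNat v := by
  simp [PySem.List.pySetD, PySem.List.pySet?, pyIdx_mod _ _ h1 h2]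

lemma getD_set_self (xs : List Int) (j : Nat) (v : Int) (h : j < xs.length) :
    (xs.set j v).getD j 0 = v := by
  simp [List.getD_eq_getElem?_getD, h]

lemma getD_set_ne (xs : List Int) (j : Nat) (v : Int) (i : Nat) (h : j ≠ i) :
    (xs.set j v).getD i 0 = xs.getD i 0 := by
  simp [List.getD_eq_getElem?_getD, h]

lemma inv_step (N x : Int) (s : List Int × Int × Int) (t : List Int × Int)
    (hx : x < N + 1 → 0 < N ∧ 1 - N ≤ x) (h : InvMC N s t) :
    InvMC N (stepA N s x) (stepB N t x) := by
  obtain ⟨C, last, mx⟩ := s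
  obtain ⟨D, mx'⟩ := t
  obtain ⟨hL1, hL2, hM, hl0, hlm, hcm, hpt⟩ := h
  simp only at hL1 hL2 hM hl0 hlm hcm hpt
  subst hM
  by_cases hlt : x < N + 1
  · obtain ⟨hN, hxl⟩ := hx hlt
    have hlenN : ((N.toNat : Nat) : Int) = N := by omega
    have hb1 : -((C.length : Nat) : Int) ≤ x - 1 := by rw [hL1]; omega
    have hb2 : (x - 1) < ((C.length : Nat) : Int) := by rw [hL1]; omega
    set J := PySem.Int.mod (x - 1) N with hJdef
    have hJe : J = (x - 1) % N := by
      rw [hJdef]; unfold PySem.Int.mod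
      rw [Int.fmod_eq_emod, if_pos (Or.inl (by omega)), add_zero]
    have hJ0 : 0 ≤ J := by rw [hJe]; exact Int.emod_nonneg _ (by omega)
    have hJN : J < N := by rw [hJe]; exact Int.emod_lt_of_pos _ (by omega)
    have hjlen : J.toNat < C.length := by omega
    have hjlen' : J.toNat < D.length := by omega
    have hgA : PySem.List.pyGetD C (x - 1) 0 = C.getD J.toNat 0 := by
      rw [pyGetD_mod C _ hb1 hb2, hL1, hlenN]
    have hsA : ∀ v, PySem.List.pySetD C (x - 1) v = C.set J.toNat v := fun v => by
      rw [pySetD_mod C _ v hb1 hb2, hL1, hlenN]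
    have hgB : PySem.List.pyGetD D (x - 1) 0 = D.getD J.toNat 0 := by
      rw [pyGetD_mod D _ (by rw [hL2]; omega) (by rw [hL2]; omega), hL2, hlenN]
    have hsB : ∀ v, PySem.List.pySetD D (x - 1) v = D.set J.toNat v := fun v => by
      rw [pySetD_mod D _ v (by rw [hL2]; omega) (by rw [hL2]; omega), hL2, hlenN]
    have hD : D.getD J.toNat 0 = if C.getD J.toNat 0 < last then last else C.getD J.toNat 0 :=
      hpt J.toNat (by omega)
    simp only [stepA, stepB, if_pos hlt, hgA, hgB, hsA, hsB, hD]
    by_cases hc : C.getD J.toNat 0 < last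
    · simp only [if_pos hc]
      unfold InvMC
      dsimp only
      refine ⟨by simp [hL1], by simp [hL2], rfl, hl0, by split_ifs <;> omega, ?_, ?_⟩
      · intro i
        by_cases hij : i = J.toNat
        · subst hij
          rw [getD_set_self _ _ _ hjlen]
          have := hcm J.toNat
          split_ifs <;> omega
        · rw [getD_set_ne _ _ _ _ (fun he => hij he.symm)]
          have := hcm i
          split_ifs <;> omega
      · intro i hi
        by_cases hij : i = J.toNat
        · subst hij
          rw [getD_set_self _ _ _ hjlen, getD_set_self _ _ _ hjlen']
          have := hcm J.toNat
          split_ifs <;> omega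
        · rw [getD_set_ne _ _ _ _ (fun he => hij he.symm),
              getD_set_ne _ _ _ _ (fun he => hij he.symm)]
          exact hpt i hi
    · simp only [if_neg hc]
      unfold InvMC
      dsimp only
      refine ⟨by simp [hL1], by simp [hL2], rfl, hl0, by split_ifs <;> omega, ?_, ?_⟩
      · intro i
        by_cases hij : i = J.toNat
        · subst hij
          rw [getD_set_self _ _ _ hjlen]
          have := hcm J.toNat
          split_ifs <;> omega
        · rw [getD_set_ne _ _ _ _ (fun he => hij he.symm)]
          have := hcm i
          split_ifs <;> omega
      · intro i hi
        by_cases hij : i = J.toNat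
        · subst hij
          rw [getD_set_self _ _ _ hjlen, getD_set_self _ _ _ hjlen']
          have := hcm J.toNat
          split_ifs <;> omega
        · rw [getD_set_ne _ _ _ _ (fun he => hij he.symm),
              getD_set_ne _ _ _ _ (fun he => hij he.symm)]
          exact hpt i hi
  · simp only [stepA, stepB, if_neg hlt]
    unfold InvMC
    dsimp only
    refine ⟨hL1, by simp, rfl, by omega, le_refl _, hcm, ?_⟩
    intro i hi
    have hrep : (List.replicate N.toNat mx').getD i 0 = mx' := by
      simp [List.getD_eq_getElem?_getD, hi]
    rw [hrep]
    have := hcm i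
    split_ifs <;> omega

lemma inv_foldl (N : Int) (A : List Int) (s : List Int × Int × Int) (t : List Int × Int)
    (hA : ∀ x ∈ A, x < N + 1 → 0 < N ∧ 1 - N ≤ x) (h : InvMC N s t) :
    InvMC N (A.foldl (stepA N) s) (A.foldl (stepB N) t) := by
  induction A generalizing s t with
  | nil => exact h
  | cons a as ih =>
      exact ih _ _ (fun x hm => hA x (List.mem_cons_of_mem _ hm))
        (inv_step N a s t (hA a (by simp)) h)

lemma floorLast_eq (last : Int) (C C' : List Int) (hl : C.length = C'.length)
    (hp : ∀ i < C.length, C'.getD i 0 = if C.getD i 0 < last then last else C.getD i 0) :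
    floorLast last C = C' := by
  induction C generalizing C' with
  | nil => cases C' with
      | nil => rfl
      | cons b bs => simp at hl
  | cons c cs ih =>
      cases C' with
      | nil => simp at hl
      | cons b bs =>
          have h0 := hp 0 (by simp)
          simp only [List.getD_cons_zero] at h0
          simp only [floorLast, ← h0]
          exact congrArg (b :: ·) (ih bs (by simpa using hl)
            (fun i hi => by simpa using hp (i + 1) (by simpa using hi)))

lemma inv_init (N : Int) : InvMC N (List.replicate N.toNat 0, 0, 0) (List.replicate N.toNat 0, 0) := by
  refine ⟨by simp, by simp, rfl, le_refl _, le_refl _, ?_, ?_⟩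
  · intro i; simp [List.getD_eq_getElem?_getD, List.getElem?_replicate]
    split <;> simp
  · intro i hi; simp

-- ===== VERDICT (by name: the statement is the Claim_ definition above) =====
theorem solution_spec : Claim_equal_solution := by
  intro N A _ hPre
  unfold Spec_solution solution solution_alt
  have h := inv_foldl N A _ _ hPre (inv_init N)
  obtain ⟨hl1, hl2, _, _, _, _, hpt⟩ := h
  exact floorLast_eq _ _ _ (by omega) (fun i hi => hpt i (by omega))
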